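-- pv_equiv track=rewrite | github.com/jsg921019/Directory | coding_test/3.py | solution
-- ===== SOURCE A (Python) =====
-- def fold(paper, i):
--     return [(paper[i+n+1] if i+n+1 < len(paper) else 0) + (paper[i-n] if i-n >= 0 else 0)
--             for n in range(max(len(paper)-i-1, i+1))]
--
-- def solution(paper, n):
--     papers = [paper]
--     answer = max(paper)
--     for _ in range(n):
--         new_papers = []
--         for p in papers:
--             for i in range(len(p)-1):
--                 folded = fold(p, i)
--                 max_folded = max(folded)
--                 if max_folded > answer: answer = max_folded
--                 new_papers.append(folded)
--         papers = new_papers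
--     return answer
-- ===== SOURCE B (Python) =====
-- def fold(paper, i):
--     return [(paper[i+n+1] if i+n+1 < len(paper) else 0) + (paper[i-n] if i-n >= 0 else 0)
--             for n in range(max(len(paper)-i-1, i+1))]
--
-- def solution(paper, n):
--     answer = max(paper)
--
--     def rec(p, depth):
--         nonlocal answer
--         if depth <= 0:
--             return
--         for i in range(len(p) - 1):
--             folded = fold(p, i)
--             m = max(folded)
--             if m > answer:
--                 answer = m
--             rec(folded, depth - 1)
--
--     rec(paper, n)
--     return answer
-- ===== Notes on version B (the rewrite author's own statement) =====
-- stated objective: alternative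
-- what changed: Replaces the level-by-level BFS that materialises every generation of folded papers in lists with a recursive depth-first traversal of the fold tree that keeps only a running maximum (no papers/new_papers queues).
import Mathlib
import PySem

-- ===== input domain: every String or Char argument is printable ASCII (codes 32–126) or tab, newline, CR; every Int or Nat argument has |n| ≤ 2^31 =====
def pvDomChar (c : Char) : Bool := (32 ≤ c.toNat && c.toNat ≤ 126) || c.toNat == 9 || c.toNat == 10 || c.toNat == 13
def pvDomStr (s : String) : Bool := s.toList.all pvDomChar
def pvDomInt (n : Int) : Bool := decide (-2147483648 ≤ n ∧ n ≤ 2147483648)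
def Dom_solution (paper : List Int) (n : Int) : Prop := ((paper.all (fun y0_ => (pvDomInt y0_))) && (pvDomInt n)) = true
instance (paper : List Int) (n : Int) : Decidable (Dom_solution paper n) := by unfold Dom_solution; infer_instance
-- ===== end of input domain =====

-- B replaces A's level-by-level BFS (papers/new_papers queues) by a depth-first
-- recursion over the fold tree carrying only the running maximum (objective: alternative).

-- ===== PORT A =====

-- Python max over a list of ints (first element as seed; [] is excluded by Pre_)
def pymax (xs : List Int) : Int :=
  match xs with
  | [] => 0
  | x :: t => t.foldl max x

-- literal port of fold(paper, i); i is the loop index from range(len(p)-1), hence a Nat;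
-- the bounds guards make getD / Nat subtraction exact w.r.t. Python indexing
def foldP (p : List Int) (i : Nat) : List Int :=
  (List.range (max (p.length - i - 1) (i + 1))).map (fun n =>
    (if i + n + 1 < p.length then p.getD (i + n + 1) 0 else 0) +
    (if n ≤ i then p.getD (i - n) 0 else 0))

-- A's loop over i in range(len(p)-1): update answer, append folded to new_papers
def stepPaper (st : Int × List (List Int)) (p : List Int) : Int × List (List Int) :=
  (List.range (p.length - 1)).foldl
    (fun st2 i =>
      let folded := foldP p i
      let m := pymax folded
      (if m > st2.1 then m else st2.1, st2.2 ++ [folded])) st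

def solution (paper : List Int) (n : Int) : Int :=
  ((List.range n.toNat).foldl
    (fun st _ => st.2.foldl stepPaper (st.1, ([] : List (List Int))))
    (pymax paper, [paper])).1

-- ===== PORT B =====

-- B's rec(p, depth): depth-first, updates the running maximum then recurses
def recB (p : List Int) (depth : Nat) (ans : Int) : Int :=
  match depth with
  | 0 => ans
  | d + 1 =>
    (List.range (p.length - 1)).foldl
      (fun a i =>
        let folded := foldP p i
        let m := pymax folded
        recB folded d (if m > a then m else a)) ans

def solution_alt (paper : List Int) (n : Int) : Int :=
  recB paper n.toNat (pymax paper)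

-- ===== PRECONDITION & SPEC =====
-- Pre_ excludes only the empty list, on which Python's max(paper) raises ValueError.
def Pre_solution (paper : List Int) (n : Int) : Prop := paper ≠ []
instance (paper : List Int) (n : Int) : Decidable (Pre_solution paper n) := by
  unfold Pre_solution; infer_instance

def pvWitness_solution : List Int × Int := ([1, -2, 3], 2)

def Spec_solution (paper : List Int) (n : Int) (out : Int) : Prop := out = solution_alt paper n
instance (paper : List Int) (n : Int) (out : Int) : Decidable (Spec_solution paper n out) := by
  unfold Spec_solution; infer_instance

-- ===== CLAIM (what is proved, stated in full; the proofs are below) =====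
def Claim_equal_solution : Prop := ∀ (paper : List Int) (n : Int), Dom_solution paper n → Pre_solution paper n → Spec_solution paper n (solution paper n)

-- ===== LEMMAS AND PROOFS =====

-- children of a paper, the DFS value sequence, the BFS (level-order) value sequence
def ch (p : List Int) : List (List Int) := (List.range (p.length - 1)).map (foldP p)

def seqB (p : List Int) : Nat → List Int
  | 0 => []
  | d + 1 => (ch p).flatMap (fun c => pymax c :: seqB c d)

def bfsL (ps : List (List Int)) : Nat → List Int
  | 0 => []
  | d + 1 => ps.flatMap (fun p => (ch p).map pymax) ++ bfsL (ps.flatMap ch) d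

theorem ifmax (a m : Int) : (if m > a then m else a) = max a m := by
  rcases le_total m a with h | h <;> simp [max_def] <;> omega

theorem foldl_max_perm {L1 L2 : List Int} (h : L1.Perm L2) (a : Int) :
    L1.foldl max a = L2.foldl max a :=
  h.foldl_eq' (fun x _ y _ z => by
    rcases le_total x y with h' | h' <;> simp [max_assoc, max_comm x y]) a

theorem foldl_max_flatMap {α : Type} (l : List α) (f : α → List Int) (a : Int) :
    (l.flatMap f).foldl max a = l.foldl (fun a x => (f x).foldl max a) a := by
  induction l generalizing a with
  | nil => rfl
  | cons x t ih => simp [List.flatMap_cons, List.foldl_append, ih]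

-- B's recursion computes the foldl-max over its DFS value sequence
theorem recB_eq (d : Nat) (p : List Int) (ans : Int) :
    recB p d ans = (seqB p d).foldl max ans := by
  induction d generalizing p ans with
  | zero => rfl
  | succ d ih =>
    show (List.range (p.length - 1)).foldl
        (fun a i => recB (foldP p i) d (if pymax (foldP p i) > a then pymax (foldP p i) else a)) ans
      = ((ch p).flatMap (fun c => pymax c :: seqB c d)).foldl max ans
    rw [ch, List.flatMap_map, foldl_max_flatMap]
    have hfun : (fun (a : Int) (i : Nat) =>
        recB (foldP p i) d (if pymax (foldP p i) > a then pymax (foldP p i) else a))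
      = fun a i => (pymax (foldP p i) :: seqB (foldP p i) d).foldl max a := by
      funext a i
      rw [ih, ifmax, List.foldl_cons]
    rw [hfun]

-- A's innermost loop in closed form
theorem stepPaper_eq (st : Int × List (List Int)) (p : List Int) :
    stepPaper st p = (((ch p).map pymax).foldl max st.1, st.2 ++ ch p) := by
  show (List.range (p.length - 1)).foldl _ st = _
  rw [ch]
  induction (List.range (p.length - 1)) generalizing st with
  | nil => simp [List.foldl_nil]
  | cons i t ih =>
    simp only [List.foldl_cons, List.map_cons]
    rw [ih, ifmax]
    simp [List.append_assoc]

-- A's middle loop in closed form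
theorem level_eq (ps : List (List Int)) (a : Int) (acc : List (List Int)) :
    ps.foldl stepPaper (a, acc)
      = ((ps.flatMap (fun p => (ch p).map pymax)).foldl max a, acc ++ ps.flatMap ch) := by
  induction ps generalizing a acc with
  | nil => simp
  | cons p t ih =>
    simp only [List.foldl_cons, List.flatMap_cons]
    rw [stepPaper_eq, ih, List.foldl_append, List.append_assoc]

-- A computes the foldl-max over the level-order (BFS) value sequence
theorem solutionLoop_eq (k : Nat) (ps : List (List Int)) (a : Int) :
    ((List.range k).foldl
      (fun st _ => st.2.foldl stepPaper (st.1, ([] : List (List Int)))) (a, ps)).1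
      = (bfsL ps k).foldl max a := by
  induction k generalizing ps a with
  | zero => rfl
  | succ k ih =>
    rw [List.range_succ_eq_map, List.foldl_cons]
    rw [level_eq, List.foldl_map, ih, bfsL, List.foldl_append, List.nil_append]

theorem flatMap_append_perm {α : Type} (l : List α) (f g : α → List Int) :
    (l.flatMap (fun x => f x ++ g x)).Perm (l.flatMap f ++ l.flatMap g) := by
  induction l with
  | nil => simp
  | cons x t ih =>
    simp only [List.flatMap_cons, List.append_assoc]
    exact ((ih.append_left (g x)).trans
      (List.perm_append_comm_assoc (g x) (t.flatMap f) (t.flatMap g))).append_left (f x)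

theorem flatMap_singleton_map {α : Type} (l : List α) (h : α → Int) :
    l.flatMap (fun x => [h x]) = l.map h := by
  induction l with
  | nil => rfl
  | cons x t ih => simp [List.flatMap_cons, ih]

theorem flatMap_perm_congr {α : Type} (l : List α) {f g : α → List Int}
    (h : ∀ x, (f x).Perm (g x)) : (l.flatMap f).Perm (l.flatMap g) := by
  induction l with
  | nil => simp
  | cons x t ih => simpa [List.flatMap_cons] using (h x).append ih

-- the BFS value sequence is a permutation of the concatenated DFS value sequences
theorem bfs_perm_seq (d : Nat) (ps : List (List Int)) :
    (bfsL ps d).Perm (ps.flatMap (fun p => seqB p d)) := by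
  induction d generalizing ps with
  | zero => simp [bfsL, seqB]
  | succ d ih =>
    rw [bfsL]
    have h1 : (ps.flatMap (fun p => (ch p).map pymax) ++ bfsL (ps.flatMap ch) d).Perm
        (ps.flatMap (fun p => (ch p).map pymax)
          ++ ps.flatMap (fun p => (ch p).flatMap (fun c => seqB c d))) := by
      have h2 := (ih (ps.flatMap ch)).append_left (ps.flatMap (fun p => (ch p).map pymax))
      rwa [List.flatMap_assoc] at h2
    refine h1.trans ?_
    refine ((flatMap_append_perm ps (fun p => (ch p).map pymax)
        (fun p => (ch p).flatMap (fun c => seqB c d))).symm).trans ?_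
    refine flatMap_perm_congr ps (fun p => ?_)
    rw [seqB, ← flatMap_singleton_map (ch p) pymax]
    exact (flatMap_append_perm (ch p) (fun c => [pymax c]) (fun c => seqB c d)).symm

-- ===== VERDICT (by name: the statement is the Claim_ definition above) =====
theorem solution_spec : Claim_equal_solution := by
  intro paper n _ _
  show solution paper n = solution_alt paper n
  rw [solution, solution_alt, solutionLoop_eq, recB_eq,
      foldl_max_perm (bfs_perm_seq n.toNat [paper])]
  simp
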